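-- pv_equiv track=rewrite | github.com/ilSommo/advent-of-code-2024 | day_12.py | load_type_regions
-- ===== SOURCE A (Python) =====
-- def load_type_regions(plants):
--     """Load type regions."""
--     type_regions = []
--
--     while plants:
--         plant = plants.pop()
--         plant_regions = []
--
--         for i, region in enumerate(type_regions):
--             for plant_ in region:
--                 if abs(plant - plant_) == 1:
--                     plant_regions.append(i)
--                     break
--
--         match len(plant_regions):
--             case 0:
--                 type_regions.append([plant])
--
--             case 1:
--                 type_regions[plant_regions[0]].append(plant)
--
--             case _:
--                 i = plant_regions[0]
--                 type_regions[i].append(plant)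
--
--                 for j in plant_regions[:0:-1]:
--                     type_regions[i].extend(type_regions.pop(j))
--
--     return type_regions
-- ===== SOURCE B (Python) =====
-- def load_type_regions(plants):
--     """Load type regions."""
--     regions = {}          # region id -> list of plants; ids ascend in insertion order
--     val2ids = {}          # plant value -> set of ids of regions containing that value
--     next_id = 0
--     for plant in reversed(plants):
--         nids = sorted(val2ids.get(plant - 1, set()) | val2ids.get(plant + 1, set()))
--         if not nids:
--             regions[next_id] = [plant]
--             val2ids.setdefault(plant, set()).add(next_id)
--             next_id += 1
--         else:
--             i = nids[0]
--             regions[i].append(plant)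
--             val2ids.setdefault(plant, set()).add(i)
--             for j in reversed(nids[1:]):
--                 content = regions.pop(j)
--                 regions[i].extend(content)
--                 for v in content:
--                     s = val2ids[v]
--                     s.discard(j)
--                     s.add(i)
--     return list(regions.values())
-- ===== Notes on version B (the rewrite author's own statement) =====
-- stated objective: faster
-- what changed: B replaces A's per-plant scan over every element of every region with an id-keyed dict of regions plus a value-to-region-ids index, so each plant only looks up its two possible neighbour values (plant-1, plant+1) and merges by key; A's quadratic scan disappears.
import Mathlib
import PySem

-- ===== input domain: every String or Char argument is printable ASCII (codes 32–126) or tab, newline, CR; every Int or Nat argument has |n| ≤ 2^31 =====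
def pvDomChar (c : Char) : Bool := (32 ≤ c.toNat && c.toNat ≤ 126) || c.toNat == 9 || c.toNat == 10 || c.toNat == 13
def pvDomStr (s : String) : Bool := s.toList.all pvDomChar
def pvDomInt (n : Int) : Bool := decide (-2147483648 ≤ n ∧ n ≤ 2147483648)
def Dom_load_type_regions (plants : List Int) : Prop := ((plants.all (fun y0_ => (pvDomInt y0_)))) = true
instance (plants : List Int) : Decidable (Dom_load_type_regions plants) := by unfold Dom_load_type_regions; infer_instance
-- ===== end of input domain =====

-- B groups the plants with a dict of regions keyed by creation id plus a value→region-ids index,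
-- so each plant checks only its two possible neighbour values instead of scanning every region;
-- the equivalence is about the RETURN value only (Python A empties its argument list in place, B does not).

-- ===== PORT A =====
-- abs(plant - plant_) == 1
def pvAdj (p q : Int) : Bool := |p - q| == 1

-- Python: for i, region in enumerate(type_regions): for plant_ in region: if adj: append(i); break
-- (the 'append once then break' inner loop is region.any; enumerate indices are the nonneg list
-- positions, ported as Nat — exact, every index A uses is a valid position)
def pvPlantRegions (regs : List (List Int)) (p : Int) : List Nat :=
  regs.zipIdx.foldl (fun acc er => if er.1.any (fun q => pvAdj p q) then acc ++ [er.2] else acc) []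

-- for j in plant_regions[:0:-1]: type_regions[i].extend(type_regions.pop(j))
-- (pop(j) at a valid position = read it, then eraseIdx; extend of element i = set; exact here)
def pvMergeA (i : Nat) (js : List Nat) (regs : List (List Int)) : List (List Int) :=
  js.foldl (fun rs j =>
    let rj := rs.getD j []
    let rs' := rs.eraseIdx j
    rs'.set i (rs'.getD i [] ++ rj)) regs

-- one iteration of A's while-loop body (plant = plants.pop()); match on len(plant_regions)
def pvStepA (regs : List (List Int)) (p : Int) : List (List Int) :=
  match pvPlantRegions regs p with
  | [] => regs ++ [[p]]
  | [i] => regs.set i (regs.getD i [] ++ [p])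
  | i :: rest =>
      pvMergeA i rest.reverse (regs.set i (regs.getD i [] ++ [p]))

-- while plants: plant = plants.pop(); … — processes the list back to front
def load_type_regions (plants : List Int) : List (List Int) :=
  plants.reverse.foldl pvStepA []

-- ===== PORT B =====
-- B's state: regions = {id: [plants]} (insertion order = ascending creation id),
-- val2ids = {value: set of ids of regions containing it}, next_id
structure PvBSt where
  regions : PySem.Dict Int (List Int)
  val2ids : PySem.Dict Int (PySem.Set Int)
  next : Int

-- for j in reversed(nids[1:]): content = regions.pop(j); regions[i].extend(content); reindex content
-- (regions.pop(j) at a present key j = getD then erase — exact, j is always a key)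
def pvMergeB (i : Int) (js : List Int) (st : PvBSt) : PvBSt :=
  js.foldl (fun st2 j =>
    let content := st2.regions.getD j []
    ⟨(st2.regions.erase j).modify i [] (fun r => r ++ content),
     content.foldl (fun m v => m.modify v PySem.Set.empty
        (fun s => PySem.Set.add (PySem.Set.discard s j) i)) st2.val2ids,
     st2.next⟩) st

-- one iteration of B's for-loop body; scrutinee = nids = sorted(val2ids.get(p-1,set()) | val2ids.get(p+1,set()))
def pvStepB (st : PvBSt) (p : Int) : PvBSt :=
  match PySem.List.sorted
      (PySem.Set.union (st.val2ids.getD (p-1) PySem.Set.empty) (st.val2ids.getD (p+1) PySem.Set.empty))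
      (fun x => x) with
  | [] =>
      ⟨st.regions.insert st.next [p],
       st.val2ids.modify p PySem.Set.empty (fun s => PySem.Set.add s st.next),
       st.next + 1⟩
  | i :: rest =>
      pvMergeB i rest.reverse
        ⟨st.regions.modify i [] (fun r => r ++ [p]),
         st.val2ids.modify p PySem.Set.empty (fun s => PySem.Set.add s i),
         st.next⟩

def load_type_regions_alt (plants : List Int) : List (List Int) :=
  (plants.reverse.foldl pvStepB ⟨PySem.Dict.empty, PySem.Dict.empty, 0⟩).regions.values

-- ===== PRECONDITION & SPEC =====
def Spec_load_type_regions (plants : List Int) (out : List (List Int)) : Prop := out = load_type_regions_alt plants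
instance (plants : List Int) (out : List (List Int)) : Decidable (Spec_load_type_regions plants out) := by unfold Spec_load_type_regions; infer_instance

-- ===== CLAIM (what is proved, stated in full; the proofs are below) =====
def Claim_equal_load_type_regions : Prop := ∀ (plants : List Int), Dom_load_type_regions plants → Spec_load_type_regions plants (load_type_regions plants)

-- ===== LEMMAS AND PROOFS =====

-- the adjacency predicate on a whole region (A's inner loop with break)
def pvQ (p : Int) (e : Int × List Int) : Bool := e.2.any (fun q => pvAdj p q)

-- the invariant tying B's state together
def PvInv (st : PvBSt) : Prop :=
  st.regions.keys.Pairwise (· < ·)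
  ∧ (∀ k ∈ st.regions.keys, k < st.next)
  ∧ (∀ v : Int, (st.val2ids.getD v PySem.Set.empty).Nodup)
  ∧ (∀ v j : Int, j ∈ st.val2ids.getD v PySem.Set.empty ↔
       ∃ r, st.regions.get? j = some r ∧ v ∈ r)

lemma pv_adj_iff (p q : Int) : pvAdj p q = true ↔ q = p - 1 ∨ q = p + 1 := by
  simp only [pvAdj, beq_iff_eq]
  rw [abs_eq (by norm_num : (0:Int) ≤ 1)]
  omega

lemma pvQ_iff (p : Int) (e : Int × List Int) :
    pvQ p e = true ↔ (p - 1) ∈ e.2 ∨ (p + 1) ∈ e.2 := by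
  simp only [pvQ, List.any_eq_true]
  constructor
  · rintro ⟨q, hq, hadj⟩
    rcases (pv_adj_iff p q).1 hadj with h | h <;> subst h
    · exact Or.inl hq
    · exact Or.inr hq
  · rintro (h | h)
    · exact ⟨_, h, (pv_adj_iff _ _).2 (Or.inl rfl)⟩
    · exact ⟨_, h, (pv_adj_iff _ _).2 (Or.inr rfl)⟩

-- ----- small set facts -----
lemma pv_add_of_mem (s : PySem.Set Int) (x : Int) (h : x ∈ s) : PySem.Set.add s x = s := by
  unfold PySem.Set.add
  rw [if_pos ((PySem.Set.contains_iff s x).2 h)]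

lemma pv_discard_of_not_mem (s : PySem.Set Int) (x : Int) (h : x ∉ s) :
    PySem.Set.discard s x = s := by
  unfold PySem.Set.discard
  apply List.filter_eq_self.2
  intro a ha
  have : a ≠ x := fun he => h (he ▸ ha)
  simp [this]

lemma pv_f_idem (j k : Int) (hne : k ≠ j) (s : PySem.Set Int) :
    PySem.Set.add (PySem.Set.discard (PySem.Set.add (PySem.Set.discard s j) k) j) k
      = PySem.Set.add (PySem.Set.discard s j) k := by
  have hjn : j ∉ PySem.Set.add (PySem.Set.discard s j) k := by
    intro hj
    rcases (PySem.Set.mem_add _ _ _).1 hj with h | h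
    · exact ((PySem.Set.mem_discard _ _ _).1 h).2 rfl
    · exact hne h.symm
  rw [pv_discard_of_not_mem _ _ hjn]
  exact pv_add_of_mem _ _ ((PySem.Set.mem_add _ _ _).2 (Or.inr rfl))

-- ----- list position facts -----
lemma pv_set_same {α : Type} : ∀ (K : List α) (i : Nat) (k : α), K[i]? = some k → K.set i k = K := by
  intro K
  induction K with
  | nil => intro i k h; simp at h
  | cons a L ih =>
      intro i k h
      cases i with
      | zero => simp at h; simp [h]
      | succ n => simp at h; simp [ih n k h]

lemma pv_fst_mem {L : List (Int × List Int)} {e : Int × List Int}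
    (h : e ∈ L) : e.1 ∈ L.map Prod.fst :=
  List.mem_map_of_mem h

lemma pv_map_if_set : ∀ (L : List (Int × List Int)) (i : Nat) (k : Int) (r w : List Int),
    (L.map Prod.fst).Nodup → L[i]? = some (k, r) →
    L.map (fun q => if (q.1 == k) = true then (k, w) else q) = L.set i (k, w) := by
  intro L
  induction L with
  | nil => intro i k r w _ h; simp at h
  | cons a L ih =>
      intro i k r w hnd h
      have hnd' : (L.map Prod.fst).Nodup := (List.nodup_cons.1 (by simpa using hnd)).2
      have hna : a.1 ∉ L.map Prod.fst := (List.nodup_cons.1 (by simpa using hnd)).1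
      cases i with
      | zero =>
          simp only [List.getElem?_cons_zero, Option.some.injEq] at h
          subst h
          simp only [List.map_cons, beq_self_eq_true, if_pos, List.set_cons_zero]
          congr 1
          have hid : ∀ q ∈ L, (fun q : Int × List Int => if (q.1 == k) = true then (k, w) else q) q = id q := by
            intro q hq
            have hqk : q.1 ≠ k := by
              intro he
              apply hna
              show k ∈ L.map Prod.fst
              rw [← he]
              exact pv_fst_mem hq
            simp [hqk]
          rw [List.map_congr_left hid, List.map_id]
      | succ n =>
          simp only [List.getElem?_cons_succ] at h
          have hk : k ∈ L.map Prod.fst :=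
            List.mem_map.2 ⟨(k, r), List.mem_of_getElem? h, rfl⟩
          have hne : a.1 ≠ k := fun he => hna (he ▸ hk)
          simp only [List.map_cons, List.set_cons_succ]
          rw [if_neg (by simpa using hne)]
          rw [ih n k r w hnd' h]

lemma pv_filter_eraseIdx : ∀ (L : List (Int × List Int)) (i : Nat) (k : Int) (r : List Int),
    (L.map Prod.fst).Nodup → L[i]? = some (k, r) →
    L.filter (fun q => !(q.1 == k)) = L.eraseIdx i := by
  intro L
  induction L with
  | nil => intro i k r _ h; simp at h
  | cons a L ih =>
      intro i k r hnd h
      have hnd' : (L.map Prod.fst).Nodup := (List.nodup_cons.1 (by simpa using hnd)).2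
      have hna : a.1 ∉ L.map Prod.fst := (List.nodup_cons.1 (by simpa using hnd)).1
      cases i with
      | zero =>
          simp only [List.getElem?_cons_zero, Option.some.injEq] at h
          subst h
          simp only [List.filter_cons, beq_self_eq_true, Bool.not_true, List.eraseIdx_cons_zero]
          simp only [Bool.false_eq_true, reduceIte]
          apply List.filter_eq_self.2
          intro q hq
          have hqk : q.1 ≠ k := by
            intro he
            apply hna
            show k ∈ L.map Prod.fst
            rw [← he]
            exact pv_fst_mem hq
          simpa using hqk
      | succ n =>
          simp only [List.getElem?_cons_succ] at h
          have hk : k ∈ L.map Prod.fst :=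
            List.mem_map.2 ⟨(k, r), List.mem_of_getElem? h, rfl⟩
          have hne : a.1 ≠ k := fun he => hna (he ▸ hk)
          simp only [List.filter_cons, List.eraseIdx_cons_succ]
          rw [if_pos (by simpa using hne)]
          rw [ih n k r hnd' h]

-- ----- dict facts -----
lemma pv_getD_of_item (d : PySem.Dict Int (List Int)) (k : Int) (r : List Int)
    (hnd : d.keys.Nodup) (h : (k, r) ∈ d.items) : d.getD k [] = r :=
  PySem.Dict.getD_of_mem_items d h hnd []

lemma pv_get?_some_iff (d : PySem.Dict Int (List Int)) (k : Int) (r : List Int)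
    (hnd : d.keys.Nodup) : d.get? k = some r ↔ (k, r) ∈ d.items :=
  PySem.Dict.get?_eq_some_iff_mem_items d k r hnd

lemma pv_items_modify (d : PySem.Dict Int (List Int)) (i : Nat) (k : Int) (r : List Int)
    (f : List Int → List Int) (hnd : d.keys.Nodup) (h : d.items[i]? = some (k, r)) :
    (d.modify k [] f).items = d.items.set i (k, f r) := by
  have hmem : (k, r) ∈ d.items := List.mem_of_getElem? h
  have hgd : d.getD k [] = r := pv_getD_of_item d k r hnd hmem
  have hcont : d.contains k = true :=
    (PySem.Dict.contains_iff_mem_keys d k).2 (pv_fst_mem hmem)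
  show (d.insert k (f (d.getD k []))).items = _
  unfold PySem.Dict.insert
  rw [if_pos hcont, hgd]
  exact pv_map_if_set d.items i k r (f r) hnd h

lemma pv_items_erase (d : PySem.Dict Int (List Int)) (i : Nat) (k : Int) (r : List Int)
    (hnd : d.keys.Nodup) (h : d.items[i]? = some (k, r)) :
    (d.erase k).items = d.items.eraseIdx i := by
  show d.items.filter (fun q => !(q.1 == k)) = _
  exact pv_filter_eraseIdx d.items i k r hnd h

lemma pv_modify_eq_insert (d : PySem.Dict Int (List Int)) (k : Int) (r : List Int)
    (f : List Int → List Int) (hgd : d.getD k [] = r) :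
    d.modify k [] f = d.insert k (f r) := by
  show d.insert k (f (d.getD k [])) = _
  rw [hgd]

lemma pv_find?_filter : ∀ (L : List (Int × List Int)) (k j : Int),
    (L.filter (fun q => !(q.1 == k))).find? (fun q => q.1 == j)
      = if j = k then none else L.find? (fun q => q.1 == j) := by
  intro L k j
  induction L with
  | nil => simp only [List.filter_nil, List.find?_nil]; split <;> rfl
  | cons a L ih =>
      by_cases hak : a.1 = k
      · rw [List.filter_cons, if_neg (by simp [hak])]
        rw [ih]
        by_cases hjk : j = k
        · rw [if_pos hjk, if_pos hjk]
        · rw [if_neg hjk, if_neg hjk]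
          rw [List.find?_cons_of_neg (by simp only [beq_iff_eq]; rw [hak]; exact fun he => hjk he.symm)]
      · rw [List.filter_cons, if_pos (by simpa using hak)]
        by_cases haj : a.1 = j
        · have hjk : j ≠ k := fun he => hak (haj.trans he)
          rw [List.find?_cons_of_pos (by simpa using haj),
              if_neg hjk, List.find?_cons_of_pos (by simpa using haj)]
        · rw [List.find?_cons_of_neg (by simpa using haj), ih]
          by_cases hjk : j = k
          · rw [if_pos hjk, if_pos hjk]
          · rw [if_neg hjk, if_neg hjk, List.find?_cons_of_neg (by simpa using haj)]

lemma pv_get?_erase (d : PySem.Dict Int (List Int)) (k j : Int) :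
    (d.erase k).get? j = if j = k then none else d.get? j := by
  show ((d.items.filter (fun q => !(q.1 == k))).find? (fun q => q.1 == j)).map Prod.snd = _
  rw [pv_find?_filter]
  by_cases hjk : j = k
  · rw [if_pos hjk, if_pos hjk]; rfl
  · rw [if_neg hjk, if_neg hjk]; rfl

lemma pv_get?_none_of_not_mem (d : PySem.Dict Int (List Int)) (k : Int)
    (hnd : d.keys.Nodup) (h : k ∉ d.keys) : d.get? k = none := by
  cases hg : d.get? k with
  | none => rfl
  | some r =>
      exact absurd (pv_fst_mem ((pv_get?_some_iff d k r hnd).1 hg)) h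

-- getD over the idempotent reindexing fold
lemma pv_getD_foldl_modify (f : PySem.Set Int → PySem.Set Int) (hf : ∀ s, f (f s) = f s) :
    ∀ (l : List Int) (m : PySem.Dict Int (PySem.Set Int)) (w : Int),
    (l.foldl (fun m v => m.modify v PySem.Set.empty f) m).getD w PySem.Set.empty
      = if w ∈ l then f (m.getD w PySem.Set.empty) else m.getD w PySem.Set.empty := by
  intro l
  induction l with
  | nil => intro m w; simp
  | cons x xs ih =>
      intro m w
      rw [List.foldl_cons, ih, PySem.Dict.getD_modify]
      by_cases hx : w = x <;> by_cases hw : w ∈ xs <;> simp [hx, hw, hf]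

-- the invariant at B's initial state
lemma pv_inv_init : PvInv ⟨PySem.Dict.empty, PySem.Dict.empty, 0⟩ := by
  refine ⟨?_, ?_, ?_, ?_⟩
  · simp [PySem.Dict.keys, PySem.Dict.empty]
  · intro k hk; simp [PySem.Dict.keys, PySem.Dict.empty] at hk
  · intro v; simp [PySem.Dict.getD, PySem.Dict.get?, PySem.Dict.empty, PySem.Set.empty]
  · intro v j
    simp [PySem.Dict.getD, PySem.Dict.get?, PySem.Dict.empty, PySem.Set.empty]

-- characterization of A's plant_regions through the filtered enumeration of B's items
lemma pv_prs_char (st : PvBSt) (p : Int) :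
    pvPlantRegions st.regions.values p
      = (st.regions.items.zipIdx.filter (fun et => pvQ p et.1)).map Prod.snd := by
  have h0 : pvPlantRegions st.regions.values p
      = [] ++ (st.regions.values.zipIdx.filter (fun er => er.1.any (fun q => pvAdj p q))).map Prod.snd := by
    unfold pvPlantRegions
    exact PySem.List.foldl_append_if _ _ _ []
  rw [h0, List.nil_append]
  have hval : st.regions.values = st.regions.items.map Prod.snd := rfl
  rw [hval, List.zipIdx_map, List.filter_map, List.map_map]
  rw [List.filter_congr (fun et _ => (rfl :
    ((fun er : (List Int) × Nat => er.1.any (fun q => pvAdj p q)) ∘ (Prod.map Prod.snd id)) et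
      = (fun et : (Int × List Int) × Nat => pvQ p et.1) et))]
  exact List.map_congr_left (fun et _ => rfl)

-- pushing map fst through an enumeration filter
lemma pv_map_fst_filter (l : List ((Int × List Int) × Nat)) (P : (Int × List Int) → Bool) :
    (l.filter (fun et => P et.1)).map Prod.fst = (l.map Prod.fst).filter P := by
  induction l with
  | nil => simp
  | cons a l ih => by_cases h : P a.1 <;> simp [h, ih]

-- characterization of B's nids through the same filtered enumeration
lemma pv_nids_char (st : PvBSt) (p : Int) (hI : PvInv st) :
    PySem.List.sorted
      (PySem.Set.union (st.val2ids.getD (p-1) PySem.Set.empty) (st.val2ids.getD (p+1) PySem.Set.empty))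
      (fun x => x)
    = (st.regions.items.zipIdx.filter (fun et => pvQ p et.1)).map (fun et => et.1.1) := by
  obtain ⟨hpw, _, hnds, hiff⟩ := hI
  have hnd : st.regions.keys.Nodup := hpw.imp ne_of_lt
  have hys : (st.regions.items.zipIdx.filter (fun et => pvQ p et.1)).map (fun et => et.1.1)
      = (st.regions.items.filter (pvQ p)).map Prod.fst := by
    have h1 : (st.regions.items.zipIdx.filter (fun et => pvQ p et.1)).map (fun et => et.1.1)
        = ((st.regions.items.zipIdx.filter (fun et => pvQ p et.1)).map Prod.fst).map Prod.fst := by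
      rw [List.map_map]; rfl
    have hz : st.regions.items.zipIdx.map Prod.fst = st.regions.items := by simp
    rw [h1, pv_map_fst_filter, hz]
  rw [hys]
  apply PySem.List.sorted_eq_of_perm_of_pairwise_lt
  · rw [List.perm_ext_iff_of_nodup]
    · intro j
      constructor
      · intro hj
        rcases List.mem_map.1 hj with ⟨e, he, rfl⟩
        have heL : e ∈ st.regions.items := List.mem_of_mem_filter he
        have hq : pvQ p e = true := (List.mem_filter.1 he).2
        have hget : st.regions.get? e.1 = some e.2 := (pv_get?_some_iff _ _ _ hnd).2 heL
        rcases (pvQ_iff p e).1 hq with h | h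
        · exact (PySem.Set.mem_union _ _ _).2 (Or.inl ((hiff (p-1) e.1).2 ⟨e.2, hget, h⟩))
        · exact (PySem.Set.mem_union _ _ _).2 (Or.inr ((hiff (p+1) e.1).2 ⟨e.2, hget, h⟩))
      · intro hj
        have hj' : (∃ r, st.regions.get? j = some r ∧ (p-1) ∈ r)
            ∨ (∃ r, st.regions.get? j = some r ∧ (p+1) ∈ r) := by
          rcases (PySem.Set.mem_union _ _ _).1 hj with h | h
          · exact Or.inl ((hiff (p-1) j).1 h)
          · exact Or.inr ((hiff (p+1) j).1 h)
        have : ∃ r, st.regions.get? j = some r ∧ pvQ p (j, r) = true := by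
          rcases hj' with ⟨r, hg, hm⟩ | ⟨r, hg, hm⟩
          · exact ⟨r, hg, (pvQ_iff p (j, r)).2 (Or.inl hm)⟩
          · exact ⟨r, hg, (pvQ_iff p (j, r)).2 (Or.inr hm)⟩
        obtain ⟨r, hg, hq⟩ := this
        have hmem : (j, r) ∈ st.regions.items := (pv_get?_some_iff _ _ _ hnd).1 hg
        exact List.mem_map.2 ⟨(j, r), List.mem_filter.2 ⟨hmem, hq⟩, rfl⟩
    · exact hnd.sublist (List.Sublist.map Prod.fst List.filter_sublist)
    · exact PySem.Set.nodup_union _ _ (hnds (p-1))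
  · exact List.Pairwise.sublist (List.Sublist.map Prod.fst List.filter_sublist) hpw

-- facts about the filtered enumeration
lemma pv_F_mem (L : List (Int × List Int)) (p : Int) :
    ∀ et ∈ L.zipIdx.filter (fun et => pvQ p et.1), L[et.2]? = some et.1 := by
  intro et het
  obtain ⟨e, t⟩ := et
  have h' := List.mem_zipIdx (List.mem_of_mem_filter het)
  have hlt : t < L.length := by simpa using h'.2.1
  have he : e = L[t] := by simpa using h'.2.2
  rw [List.getElem?_eq_getElem hlt]
  exact congrArg some he.symm

lemma pv_F_pairwise (L : List (Int × List Int)) (p : Int) :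
    ((L.zipIdx.filter (fun et => pvQ p et.1)).map Prod.snd).Pairwise (· < ·) := by
  rw [List.pairwise_map]
  apply List.Pairwise.sublist List.filter_sublist
  rw [List.pairwise_iff_getElem]
  intro a b ha hb hab
  rw [List.getElem_zipIdx, List.getElem_zipIdx]
  simpa using hab

-- unfolding the fold bodies one step
lemma pvMergeA_cons (i : Nat) (j : Nat) (js : List Nat) (rs : List (List Int)) :
    pvMergeA i (j :: js) rs
      = pvMergeA i js ((rs.eraseIdx j).set i ((rs.eraseIdx j).getD i [] ++ rs.getD j [])) := rfl

lemma pvMergeB_cons (i : Int) (j : Int) (js : List Int) (st : PvBSt) :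
    pvMergeB i (j :: js) st
      = pvMergeB i js
          ⟨(st.regions.erase j).modify i [] (fun r => r ++ st.regions.getD j []),
           (st.regions.getD j []).foldl (fun m v => m.modify v PySem.Set.empty
              (fun s => PySem.Set.add (PySem.Set.discard s j) i)) st.val2ids,
           st.next⟩ := rfl

-- branch equations for the step functions
lemma pvStepA_nil (regs : List (List Int)) (p : Int) (h : pvPlantRegions regs p = []) :
    pvStepA regs p = regs ++ [[p]] := by unfold pvStepA; rw [h]

lemma pvStepA_one (regs : List (List Int)) (p : Int) (i : Nat) (h : pvPlantRegions regs p = [i]) :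
    pvStepA regs p = regs.set i (regs.getD i [] ++ [p]) := by unfold pvStepA; rw [h]

lemma pvStepA_many (regs : List (List Int)) (p : Int) (i j : Nat) (rest : List Nat)
    (h : pvPlantRegions regs p = i :: j :: rest) :
    pvStepA regs p = pvMergeA i (j :: rest).reverse (regs.set i (regs.getD i [] ++ [p])) := by
  unfold pvStepA; rw [h]

lemma pvStepB_nil (st : PvBSt) (p : Int)
    (h : PySem.List.sorted
      (PySem.Set.union (st.val2ids.getD (p-1) PySem.Set.empty) (st.val2ids.getD (p+1) PySem.Set.empty))
      (fun x => x) = []) :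
    pvStepB st p = ⟨st.regions.insert st.next [p],
       st.val2ids.modify p PySem.Set.empty (fun s => PySem.Set.add s st.next),
       st.next + 1⟩ := by unfold pvStepB; rw [h]

lemma pvStepB_cons (st : PvBSt) (p : Int) (i : Int) (rest : List Int)
    (h : PySem.List.sorted
      (PySem.Set.union (st.val2ids.getD (p-1) PySem.Set.empty) (st.val2ids.getD (p+1) PySem.Set.empty))
      (fun x => x) = i :: rest) :
    pvStepB st p = pvMergeB i rest.reverse
        ⟨st.regions.modify i [] (fun r => r ++ [p]),
         st.val2ids.modify p PySem.Set.empty (fun s => PySem.Set.add s i),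
         st.next⟩ := by unfold pvStepB; rw [h]

-- first touch: append p to the region at position t / key k0, and index p under k0
lemma pv_touch (st : PvBSt) (p : Int) (t : Nat) (k0 : Int) (r0 : List Int)
    (hI : PvInv st) (ht : st.regions.items[t]? = some (k0, r0)) :
    (st.regions.modify k0 [] (fun r => r ++ [p])).items = st.regions.items.set t (k0, r0 ++ [p])
    ∧ st.regions.values.set t (st.regions.values.getD t [] ++ [p])
        = (st.regions.modify k0 [] (fun r => r ++ [p])).values
    ∧ PvInv ⟨st.regions.modify k0 [] (fun r => r ++ [p]),
             st.val2ids.modify p PySem.Set.empty (fun s => PySem.Set.add s k0), st.next⟩ := by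
  obtain ⟨hpw, hbd, hnds, hiff⟩ := hI
  have hnd : st.regions.keys.Nodup := hpw.imp ne_of_lt
  have hitems := pv_items_modify st.regions t k0 r0 (fun r => r ++ [p]) hnd ht
  have hmem : (k0, r0) ∈ st.regions.items := List.mem_of_getElem? ht
  have hgd : st.regions.getD k0 [] = r0 := pv_getD_of_item _ _ _ hnd hmem
  have hget0 : st.regions.get? k0 = some r0 := (pv_get?_some_iff _ _ _ hnd).2 hmem
  have hkeys : (st.regions.modify k0 [] (fun r => r ++ [p])).keys = st.regions.keys := by
    show (st.regions.modify k0 [] (fun r => r ++ [p])).items.map Prod.fst = st.regions.items.map Prod.fst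
    rw [hitems, List.map_set]
    exact pv_set_same _ t k0 (by rw [List.getElem?_map, ht]; rfl)
  have hget : ∀ j : Int, (st.regions.modify k0 [] (fun r => r ++ [p])).get? j
      = if j = k0 then some (r0 ++ [p]) else st.regions.get? j := by
    intro j
    rw [pv_modify_eq_insert st.regions k0 r0 _ hgd]
    exact PySem.Dict.get?_insert st.regions k0 j (r0 ++ [p])
  refine ⟨hitems, ?_, ?_⟩
  · have hval : st.regions.values = st.regions.items.map Prod.snd := rfl
    show st.regions.values.set t _ = (st.regions.modify k0 [] (fun r => r ++ [p])).items.map Prod.snd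
    rw [hitems, List.map_set, hval, List.getD_eq_getElem?_getD, List.getElem?_map, ht]
    rfl
  · refine ⟨by rw [hkeys]; exact hpw, by rw [hkeys]; exact hbd, ?_, ?_⟩
    · intro v
      show ((st.val2ids.modify p PySem.Set.empty (fun s => PySem.Set.add s k0)).getD v PySem.Set.empty).Nodup
      rw [PySem.Dict.getD_modify]
      split
      · exact PySem.Set.nodup_add _ _ (hnds p)
      · exact hnds v
    · intro v j
      show j ∈ (st.val2ids.modify p PySem.Set.empty (fun s => PySem.Set.add s k0)).getD v PySem.Set.empty
        ↔ ∃ r, (st.regions.modify k0 [] (fun r => r ++ [p])).get? j = some r ∧ v ∈ r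
      rw [PySem.Dict.getD_modify, hget j]
      by_cases hv : v = p
      · rw [hv, if_pos rfl, PySem.Set.mem_add]
        constructor
        · rintro (h | hjk)
          · obtain ⟨r, hg, hm⟩ := (hiff p j).1 h
            by_cases hj : j = k0
            · have h2 : r0 = r := by rw [hj, hget0] at hg; injection hg
              exact ⟨r0 ++ [p], by rw [if_pos hj],
                List.mem_append.2 (Or.inl (by rw [h2]; exact hm))⟩
            · exact ⟨r, by rw [if_neg hj]; exact hg, hm⟩
          · exact ⟨r0 ++ [p], by rw [if_pos hjk],
              List.mem_append.2 (Or.inr (by simp))⟩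
        · rintro ⟨r, hg, hm⟩
          by_cases hj : j = k0
          · exact Or.inr hj
          · rw [if_neg hj] at hg
            exact Or.inl ((hiff p j).2 ⟨r, hg, hm⟩)
      · rw [if_neg hv]
        constructor
        · intro h
          obtain ⟨r, hg, hm⟩ := (hiff v j).1 h
          by_cases hj : j = k0
          · have h2 : r0 = r := by rw [hj, hget0] at hg; injection hg
            exact ⟨r0 ++ [p], by rw [if_pos hj],
              List.mem_append.2 (Or.inl (by rw [h2]; exact hm))⟩
          · exact ⟨r, by rw [if_neg hj]; exact hg, hm⟩
        · rintro ⟨r, hg, hm⟩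
          by_cases hj : j = k0
          · rw [if_pos hj] at hg
            have h2 : r0 ++ [p] = r := by injection hg
            have hm0 : v ∈ r0 := by
              rw [← h2] at hm
              rcases List.mem_append.1 hm with h | h
              · exact h
              · exact absurd (List.mem_singleton.1 h) hv
            exact (hiff v j).2 ⟨r0, by rw [hj]; exact hget0, hm0⟩
          · rw [if_neg hj] at hg
            exact (hiff v j).2 ⟨r, hg, hm⟩

-- the merge fold: A over positions, B over keys, in lockstep
lemma pv_merge_sim (p : Int) (i : Nat) (k0 : Int) :
    ∀ (G : List ((Int × List Int) × Nat)) (st2 : PvBSt),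
    PvInv st2 →
    (∃ r0, st2.regions.items[i]? = some (k0, r0)) →
    (∀ et ∈ G, st2.regions.items[et.2]? = some et.1) →
    (G.map Prod.snd).Pairwise (· > ·) →
    (∀ et ∈ G, i < et.2) →
    pvMergeA i (G.map Prod.snd) st2.regions.values
      = (pvMergeB k0 (G.map (fun et => et.1.1)) st2).regions.values
    ∧ PvInv (pvMergeB k0 (G.map (fun et => et.1.1)) st2) := by
  intro G
  induction G with
  | nil => intro st2 hI _ _ _ _; exact ⟨rfl, hI⟩
  | cons et G' ih =>
      intro st2 hI hpos hpend hdesc hgt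
      obtain ⟨e, t⟩ := et
      obtain ⟨r0, hr0⟩ := hpos
      obtain ⟨hpw, hbd, hnds, hiff⟩ := hI
      have hnd : st2.regions.keys.Nodup := hpw.imp ne_of_lt
      have hti : i < t := hgt (e, t) List.mem_cons_self
      have hit : st2.regions.items[t]? = some e := hpend (e, t) List.mem_cons_self
      obtain ⟨hts, hitt⟩ := List.getElem?_eq_some_iff.1 hit
      have his : i < st2.regions.items.length := lt_trans hti hts
      have hmeme : (e.1, e.2) ∈ st2.regions.items := by
        simpa using List.mem_of_getElem? hit
      have hmemi : (k0, r0) ∈ st2.regions.items := List.mem_of_getElem? hr0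
      have hgete : st2.regions.get? e.1 = some e.2 := (pv_get?_some_iff _ _ _ hnd).2 hmeme
      have hgeti : st2.regions.get? k0 = some r0 := (pv_get?_some_iff _ _ _ hnd).2 hmemi
      have hgde : st2.regions.getD e.1 [] = e.2 := pv_getD_of_item _ _ _ hnd hmeme
      -- k0 < e.1 hence k0 ≠ e.1
      have hk0e : k0 < e.1 := by
        have hkl : st2.regions.keys.length = st2.regions.items.length := by
          show (st2.regions.items.map Prod.fst).length = _
          simp
        have h1 := (List.pairwise_iff_getElem.1 hpw) i t (by rw [hkl]; exact his) (by rw [hkl]; exact hts) hti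
        have hki : st2.regions.keys[i]'(by rw [hkl]; exact his) = k0 := by
          show (st2.regions.items.map Prod.fst)[i]'_ = k0
          rw [List.getElem_map]
          have := List.getElem?_eq_getElem (l := st2.regions.items) his
          rw [hr0] at this
          have h2 : st2.regions.items[i] = (k0, r0) := by injection this.symm
          rw [h2]
        have hkt : st2.regions.keys[t]'(by rw [hkl]; exact hts) = e.1 := by
          show (st2.regions.items.map Prod.fst)[t]'_ = e.1
          rw [List.getElem_map, hitt]
        rw [hki, hkt] at h1
        exact h1
      have hne : k0 ≠ e.1 := ne_of_lt hk0e
      -- the erased dict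
      have herase : (st2.regions.erase e.1).items = st2.regions.items.eraseIdx t :=
        pv_items_erase st2.regions t e.1 e.2 hnd (by simpa using hit)
      have hkE : (st2.regions.erase e.1).keys = st2.regions.keys.eraseIdx t := by
        show (st2.regions.erase e.1).items.map Prod.fst = (st2.regions.items.map Prod.fst).eraseIdx t
        rw [herase, List.eraseIdx_map]
      have hpwE : (st2.regions.erase e.1).keys.Pairwise (· < ·) := by
        rw [hkE]; exact List.Pairwise.sublist (List.eraseIdx_sublist _ _) hpw
      have hndE : (st2.regions.erase e.1).keys.Nodup := hpwE.imp ne_of_lt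
      have heraseI : (st2.regions.erase e.1).items[i]? = some (k0, r0) := by
        rw [herase, List.getElem?_eraseIdx, if_pos hti]; exact hr0
      have hgdEi : (st2.regions.erase e.1).getD k0 [] = r0 :=
        pv_getD_of_item _ _ _ hndE (List.mem_of_getElem? heraseI)
      -- the merged dict d'
      have hmod : ((st2.regions.erase e.1).modify k0 [] (fun r => r ++ st2.regions.getD e.1 [])).items
          = (st2.regions.items.eraseIdx t).set i (k0, r0 ++ e.2) := by
        rw [hgde]
        rw [pv_items_modify (st2.regions.erase e.1) i k0 r0 (fun r => r ++ e.2) hndE heraseI, herase]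
      have hget' : ∀ j : Int,
          ((st2.regions.erase e.1).modify k0 [] (fun r => r ++ st2.regions.getD e.1 [])).get? j
          = if j = k0 then some (r0 ++ e.2) else if j = e.1 then none else st2.regions.get? j := by
        intro j
        rw [hgde, pv_modify_eq_insert _ k0 r0 _ hgdEi, PySem.Dict.get?_insert]
        by_cases hj : j = k0
        · rw [if_pos hj, if_pos hj]
        · rw [if_neg hj, if_neg hj, pv_get?_erase]
      -- keys of d'
      have hkeys' : ((st2.regions.erase e.1).modify k0 [] (fun r => r ++ st2.regions.getD e.1 [])).keys
          = st2.regions.keys.eraseIdx t := by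
        show ((st2.regions.erase e.1).modify k0 [] (fun r => r ++ st2.regions.getD e.1 [])).items.map Prod.fst = _
        rw [hmod, List.map_set]
        have : (st2.regions.items.eraseIdx t).map Prod.fst = st2.regions.keys.eraseIdx t := by
          show _ = (st2.regions.items.map Prod.fst).eraseIdx t
          rw [List.eraseIdx_map]
        rw [this]
        exact pv_set_same _ i k0 (by
          rw [← this, List.getElem?_map, List.getElem?_eraseIdx, if_pos hti, hr0]; rfl)
      -- the A-side one step equals values of the B-side one step
      have hvalA : (st2.regions.values.eraseIdx t).set i
            ((st2.regions.values.eraseIdx t).getD i [] ++ st2.regions.values.getD t [])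
          = ((st2.regions.erase e.1).modify k0 [] (fun r => r ++ st2.regions.getD e.1 [])).values := by
        have hvt : st2.regions.values.getD t [] = e.2 := by
          show (st2.regions.items.map Prod.snd).getD t [] = e.2
          rw [List.getD_eq_getElem?_getD, List.getElem?_map, hit]; rfl
        have hvE : st2.regions.values.eraseIdx t = (st2.regions.items.eraseIdx t).map Prod.snd := by
          show (st2.regions.items.map Prod.snd).eraseIdx t = _
          rw [List.eraseIdx_map]
        have hvi : (st2.regions.values.eraseIdx t).getD i [] = r0 := by
          rw [hvE, List.getD_eq_getElem?_getD, List.getElem?_map,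
              List.getElem?_eraseIdx, if_pos hti, hr0]
          rfl
        show _ = ((st2.regions.erase e.1).modify k0 [] (fun r => r ++ st2.regions.getD e.1 [])).items.map Prod.snd
        rw [hmod, List.map_set, ← hvE, hvt, hvi]
      -- the new B state and its invariant
      set st2' : PvBSt := ⟨(st2.regions.erase e.1).modify k0 [] (fun r => r ++ st2.regions.getD e.1 []),
        (st2.regions.getD e.1 []).foldl (fun m v => m.modify v PySem.Set.empty
            (fun s => PySem.Set.add (PySem.Set.discard s e.1) k0)) st2.val2ids,
        st2.next⟩ with hst2'
      have hfold : ∀ (v : Int), st2'.val2ids.getD v PySem.Set.empty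
          = if v ∈ e.2 then PySem.Set.add (PySem.Set.discard (st2.val2ids.getD v PySem.Set.empty) e.1) k0
            else st2.val2ids.getD v PySem.Set.empty := by
        intro v
        show ((st2.regions.getD e.1 []).foldl _ st2.val2ids).getD v PySem.Set.empty = _
        rw [hgde, pv_getD_foldl_modify _ (pv_f_idem e.1 k0 hne)]
      have hI' : PvInv st2' := by
        refine ⟨?_, ?_, ?_, ?_⟩
        · show st2'.regions.keys.Pairwise (· < ·)
          rw [hst2']; dsimp only; rw [hkeys']
          exact List.Pairwise.sublist (List.eraseIdx_sublist _ _) hpw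
        · show ∀ k ∈ st2'.regions.keys, k < st2'.next
          rw [hst2']; dsimp only; rw [hkeys']
          intro k hk
          exact hbd k (List.mem_of_mem_eraseIdx hk)
        · intro v
          rw [hfold v]
          split
          · exact PySem.Set.nodup_add _ _ (PySem.Set.nodup_discard _ _ (hnds v))
          · exact hnds v
        · intro v j
          rw [hfold v]
          show _ ↔ ∃ r, ((st2.regions.erase e.1).modify k0 [] (fun r => r ++ st2.regions.getD e.1 [])).get? j = some r ∧ v ∈ r
          rw [hget' j]
          by_cases hv : v ∈ e.2
          · rw [if_pos hv, PySem.Set.mem_add, PySem.Set.mem_discard]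
            constructor
            · rintro (⟨h, hje⟩ | hjk)
              · obtain ⟨r, hg, hm⟩ := (hiff v j).1 h
                by_cases hj : j = k0
                · have h2 : r0 = r := by rw [hj, hgeti] at hg; injection hg
                  exact ⟨r0 ++ e.2, by rw [if_pos hj],
                    List.mem_append.2 (Or.inl (by rw [h2]; exact hm))⟩
                · exact ⟨r, by rw [if_neg hj, if_neg hje]; exact hg, hm⟩
              · exact ⟨r0 ++ e.2, by rw [if_pos hjk], List.mem_append.2 (Or.inr hv)⟩
            · rintro ⟨r, hg, hm⟩
              by_cases hj : j = k0
              · exact Or.inr hj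
              · rw [if_neg hj] at hg
                by_cases hje : j = e.1
                · rw [if_pos hje] at hg; exact absurd hg (by simp)
                · rw [if_neg hje] at hg
                  exact Or.inl ⟨(hiff v j).2 ⟨r, hg, hm⟩, hje⟩
          · rw [if_neg hv]
            constructor
            · intro h
              obtain ⟨r, hg, hm⟩ := (hiff v j).1 h
              by_cases hj : j = k0
              · have h2 : r0 = r := by rw [hj, hgeti] at hg; injection hg
                exact ⟨r0 ++ e.2, by rw [if_pos hj],
                  List.mem_append.2 (Or.inl (by rw [h2]; exact hm))⟩
              · by_cases hje : j = e.1
                · have h2 : e.2 = r := by rw [hje, hgete] at hg; injection hg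
                  exact absurd (by rw [h2]; exact hm) hv
                · exact ⟨r, by rw [if_neg hj, if_neg hje]; exact hg, hm⟩
            · rintro ⟨r, hg, hm⟩
              by_cases hj : j = k0
              · rw [if_pos hj] at hg
                have h2 : r0 ++ e.2 = r := by injection hg
                have hm0 : v ∈ r0 := by
                  rw [← h2] at hm
                  rcases List.mem_append.1 hm with h | h
                  · exact h
                  · exact absurd h hv
                exact (hiff v j).2 ⟨r0, by rw [hj]; exact hgeti, hm0⟩
              · rw [if_neg hj] at hg
                by_cases hje : j = e.1
                · rw [if_pos hje] at hg; exact absurd hg (by simp)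
                · rw [if_neg hje] at hg
                  exact (hiff v j).2 ⟨r, hg, hm⟩
      -- pending facts for the tail
      have hpend' : ∀ et ∈ G', st2'.regions.items[et.2]? = some et.1 := by
        intro et' het'
        have hlt : et'.2 < t := by
          have := (List.pairwise_cons.1 hdesc).1
          exact this et'.2 (List.mem_map_of_mem het')
        have hne0 : et'.2 ≠ i := by
          have := hgt et' (List.mem_cons_of_mem _ het')
          omega
        show st2'.regions.items[et'.2]? = some et'.1
        rw [hst2']; dsimp only; rw [hmod, List.getElem?_set]
        rw [if_neg (fun h => hne0 h.symm)]
        rw [List.getElem?_eraseIdx, if_pos hlt]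
        exact hpend et' (List.mem_cons_of_mem _ het')
      have hpos' : ∃ r0', st2'.regions.items[i]? = some (k0, r0') := by
        refine ⟨r0 ++ e.2, ?_⟩
        rw [hst2']; dsimp only; rw [hmod, List.getElem?_set, if_pos rfl]
        rw [if_pos (by rw [List.length_eraseIdx_of_lt hts]; omega)]
      -- assemble via the induction hypothesis
      have hA : (((e, t) :: G').map Prod.snd) = t :: G'.map Prod.snd := rfl
      have hB : (((e, t) :: G').map (fun et => et.1.1)) = e.1 :: G'.map (fun et => et.1.1) := rfl
      rw [hA, hB, pvMergeA_cons, pvMergeB_cons, hvalA]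
      exact ih st2' hI' hpos' hpend'
        ((List.pairwise_cons.1 hdesc).2)
        (fun et' het' => hgt et' (List.mem_cons_of_mem _ het'))

-- one full step in lockstep
lemma pv_step_sim (st : PvBSt) (regs : List (List Int)) (p : Int)
    (hv : regs = st.regions.values) (hI : PvInv st) :
    pvStepA regs p = (pvStepB st p).regions.values ∧ PvInv (pvStepB st p) := by
  subst hv
  have hIc := hI
  obtain ⟨hpw, hbd, hnds, hiff⟩ := hIc
  have hnd : st.regions.keys.Nodup := hpw.imp ne_of_lt
  have hprs := pv_prs_char st p
  have hnids := pv_nids_char st p hI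
  have hFmem := pv_F_mem st.regions.items p
  have hFpw := pv_F_pairwise st.regions.items p
  cases hF : st.regions.items.zipIdx.filter (fun et => pvQ p et.1) with
  | nil =>
      rw [hF] at hprs hnids
      rw [pvStepA_nil _ _ (by simpa using hprs),
          pvStepB_nil st p (by simpa using hnids)]
      have hnotin : st.next ∉ st.regions.keys := fun h => lt_irrefl _ (hbd _ h)
      have hcont : st.regions.contains st.next = false := by
        cases h : st.regions.contains st.next
        · rfl
        · exact absurd ((PySem.Dict.contains_iff_mem_keys _ _).1 h) hnotin
      have hitems : (st.regions.insert st.next [p]).items = st.regions.items ++ [(st.next, [p])] :=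
        PySem.Dict.items_insert_of_not_contains _ _ hcont
      have hkeys : (st.regions.insert st.next [p]).keys = st.regions.keys ++ [st.next] := by
        show (st.regions.insert st.next [p]).items.map Prod.fst = _
        rw [hitems, List.map_append]; rfl
      have hget : ∀ j : Int, (st.regions.insert st.next [p]).get? j
          = if j = st.next then some [p] else st.regions.get? j :=
        fun j => PySem.Dict.get?_insert st.regions st.next j [p]
      have hgnone : st.regions.get? st.next = none :=
        pv_get?_none_of_not_mem _ _ hnd hnotin
      constructor
      · show st.regions.values ++ [[p]] = (st.regions.insert st.next [p]).items.map Prod.snd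
        rw [hitems, List.map_append]; rfl
      · refine ⟨?_, ?_, ?_, ?_⟩
        · show (st.regions.insert st.next [p]).keys.Pairwise (· < ·)
          rw [hkeys, List.pairwise_append]
          exact ⟨hpw, List.pairwise_singleton _ _,
            fun a ha b hb => by rw [List.mem_singleton.1 hb]; exact hbd a ha⟩
        · show ∀ k ∈ (st.regions.insert st.next [p]).keys, k < st.next + 1
          rw [hkeys]
          intro k hk
          rcases List.mem_append.1 hk with h | h
          · have := hbd k h; omega
          · rw [List.mem_singleton.1 h]; omega
        · intro v
          show ((st.val2ids.modify p PySem.Set.empty (fun s => PySem.Set.add s st.next)).getD v PySem.Set.empty).Nodup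
          rw [PySem.Dict.getD_modify]
          split
          · exact PySem.Set.nodup_add _ _ (hnds p)
          · exact hnds v
        · intro v j
          show j ∈ (st.val2ids.modify p PySem.Set.empty (fun s => PySem.Set.add s st.next)).getD v PySem.Set.empty
            ↔ ∃ r, (st.regions.insert st.next [p]).get? j = some r ∧ v ∈ r
          rw [PySem.Dict.getD_modify, hget j]
          by_cases hv : v = p
          · rw [hv, if_pos rfl, PySem.Set.mem_add]
            constructor
            · rintro (h | hjk)
              · obtain ⟨r, hg, hm⟩ := (hiff p j).1 h
                by_cases hj : j = st.next
                · rw [hj, hgnone] at hg; exact absurd hg (by simp)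
                · exact ⟨r, by rw [if_neg hj]; exact hg, hm⟩
              · exact ⟨[p], by rw [if_pos hjk], by simp⟩
            · rintro ⟨r, hg, hm⟩
              by_cases hj : j = st.next
              · exact Or.inr hj
              · rw [if_neg hj] at hg
                exact Or.inl ((hiff p j).2 ⟨r, hg, hm⟩)
          · rw [if_neg hv]
            constructor
            · intro h
              obtain ⟨r, hg, hm⟩ := (hiff v j).1 h
              by_cases hj : j = st.next
              · rw [hj, hgnone] at hg; exact absurd hg (by simp)
              · exact ⟨r, by rw [if_neg hj]; exact hg, hm⟩
            · rintro ⟨r, hg, hm⟩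
              by_cases hj : j = st.next
              · rw [if_pos hj] at hg
                have h2 : [p] = r := by injection hg
                rw [← h2] at hm
                exact absurd (List.mem_singleton.1 hm) hv
              · rw [if_neg hj] at hg
                exact (hiff v j).2 ⟨r, hg, hm⟩
  | cons et0 Ftail =>
      obtain ⟨e0, t0⟩ := et0
      have hit0 : st.regions.items[t0]? = some e0 :=
        hFmem (e0, t0) (hF ▸ List.mem_cons_self)
      have htouch := pv_touch st p t0 e0.1 e0.2 hI (by simpa using hit0)
      obtain ⟨ht1, ht2, ht3⟩ := htouch
      rw [hF] at hprs hnids hFpw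
      cases Ftail with
      | nil =>
          rw [pvStepA_one _ _ t0 (by simpa using hprs),
              pvStepB_cons st p e0.1 [] (by simpa using hnids)]
          show _ = (pvMergeB e0.1 [] _).regions.values ∧ PvInv (pvMergeB e0.1 [] _)
          exact ⟨ht2, ht3⟩
      | cons et1 F' =>
          have hprs' : pvPlantRegions st.regions.values p
              = t0 :: et1.2 :: (F'.map Prod.snd) := by simpa using hprs
          have hnids' : PySem.List.sorted
              (PySem.Set.union (st.val2ids.getD (p-1) PySem.Set.empty) (st.val2ids.getD (p+1) PySem.Set.empty))
              (fun x => x) = e0.1 :: et1.1.1 :: (F'.map (fun et => et.1.1)) := by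
            simpa using hnids
          rw [pvStepA_many _ _ t0 et1.2 (F'.map Prod.snd) hprs',
              pvStepB_cons st p e0.1 (et1.1.1 :: (F'.map (fun et => et.1.1))) hnids']
          have hrw1 : (et1.2 :: F'.map Prod.snd).reverse = ((et1 :: F').reverse).map Prod.snd := by
            rw [List.map_reverse, List.map_cons]
          have hrw2 : (et1.1.1 :: F'.map (fun et => et.1.1)).reverse
              = ((et1 :: F').reverse).map (fun et => et.1.1) := by
            rw [List.map_reverse, List.map_cons]
          rw [hrw1, hrw2, ht2]
          set st1 : PvBSt := ⟨st.regions.modify e0.1 [] (fun r => r ++ [p]),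
            st.val2ids.modify p PySem.Set.empty (fun s => PySem.Set.add s e0.1), st.next⟩ with hst1
          have ht0len : t0 < st.regions.items.length :=
            (List.getElem?_eq_some_iff.1 hit0).1
          have hFgt : ∀ et ∈ et1 :: F', t0 < et.2 := by
            have h := (List.pairwise_cons.1 hFpw).1
            intro et' het'
            exact h et'.2 (List.mem_map_of_mem het')
          apply pv_merge_sim p t0 e0.1 ((et1 :: F').reverse) st1 ht3
          · refine ⟨e0.2 ++ [p], ?_⟩
            show st1.regions.items[t0]? = _
            rw [hst1]; dsimp only; rw [ht1, List.getElem?_set, if_pos rfl, if_pos ht0len]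
          · intro et' het'
            have hmemF : et' ∈ et1 :: F' := List.mem_reverse.1 het'
            have hlt : t0 < et'.2 := hFgt et' hmemF
            show st1.regions.items[et'.2]? = some et'.1
            rw [hst1]; dsimp only; rw [ht1, List.getElem?_set, if_neg (by omega)]
            exact hFmem et' (hF ▸ List.mem_cons_of_mem _ hmemF)
          · have hFpw' : List.Pairwise (· < ·) (t0 :: (et1 :: F').map Prod.snd) := by
              simpa using hFpw
            rw [List.map_reverse, List.pairwise_reverse]
            exact (List.pairwise_cons.1 hFpw').2
          · intro et' het'
            exact hFgt et' (List.mem_reverse.1 het')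

lemma pv_fold_sim (l : List Int) : ∀ (st : PvBSt) (regs : List (List Int)),
    regs = st.regions.values → PvInv st →
    l.foldl pvStepA regs = (l.foldl pvStepB st).regions.values ∧ PvInv (l.foldl pvStepB st) := by
  induction l with
  | nil => intro st regs hv hI; exact ⟨hv, hI⟩
  | cons x xs ih =>
      intro st regs hv hI
      obtain ⟨h1, h2⟩ := pv_step_sim st regs x hv hI
      simpa using ih (pvStepB st x) (pvStepA regs x) h1 h2

-- ===== VERDICT (by name: the statement is the Claim_ definition above) =====
theorem load_type_regions_spec : Claim_equal_load_type_regions := by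
  intro plants _
  show load_type_regions plants = load_type_regions_alt plants
  exact (pv_fold_sim plants.reverse ⟨PySem.Dict.empty, PySem.Dict.empty, 0⟩ [] rfl pv_inv_init).1
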